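-- pv_equiv track=rewrite | github.com/theofuhrmann/masters-thesis | ablation_studies/aggregate_ablation_results.py | detect_study_type
-- ===== SOURCE A (Python) =====
-- from typing import Dict, List, Any
--
-- def detect_study_type(samples: List[Dict[str, Any]]) -> str:
--     keys = set().union(*[s.keys() for s in samples])
--     # Support both per-chunk and per-song key conventions
--     if 'shuffled_SI_SDR' in keys or 'shuffled_mean' in keys:
--         return 'temporal_shuffle'
--     if any(k in keys for k in ['mouth_mask_SI_SDR', 'nose_mask_SI_SDR', 'mouth_mean', 'nose_mean']):
--         return 'region_masking'
--     if any(k.startswith('SI_SDR_per_p') or k == 'proportions' for k in keys):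
--         return 'landmark_dropout'
--     return 'unknown'
-- ===== SOURCE B (Python) =====
-- def detect_study_type(samples):
--     best = 3
--     for s in samples:
--         for k in s:
--             if k == 'shuffled_SI_SDR' or k == 'shuffled_mean':
--                 p = 0
--             elif k in ('mouth_mask_SI_SDR', 'nose_mask_SI_SDR', 'mouth_mean', 'nose_mean'):
--                 p = 1
--             elif k.startswith('SI_SDR_per_p') or k == 'proportions':
--                 p = 2
--             else:
--                 p = 3
--             if p < best:
--                 best = p
--     return ('temporal_shuffle', 'region_masking', 'landmark_dropout', 'unknown')[best]
-- ===== Notes on version B (the rewrite author's own statement) =====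
-- stated objective: alternative
-- what changed: Replaced A's union-of-key-sets plus three sequential membership/any scans with a single pass over all keys that tracks the minimum matching category priority (0/1/2/3) and maps it back to the category name at the end.
import Mathlib
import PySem

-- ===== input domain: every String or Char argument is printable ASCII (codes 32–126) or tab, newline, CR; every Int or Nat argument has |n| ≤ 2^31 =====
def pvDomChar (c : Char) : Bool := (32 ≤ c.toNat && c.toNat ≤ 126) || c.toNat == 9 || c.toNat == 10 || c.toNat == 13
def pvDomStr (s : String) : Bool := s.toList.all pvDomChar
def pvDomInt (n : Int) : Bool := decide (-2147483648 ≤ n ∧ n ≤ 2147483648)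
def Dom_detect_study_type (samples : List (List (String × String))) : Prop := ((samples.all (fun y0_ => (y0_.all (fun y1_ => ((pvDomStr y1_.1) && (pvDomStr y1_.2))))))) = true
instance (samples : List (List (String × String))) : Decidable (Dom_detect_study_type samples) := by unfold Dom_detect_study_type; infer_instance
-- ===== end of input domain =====

-- B replaces A's union-of-key-sets plus three sequential membership scans with one
-- pass over all keys tracking the minimum matching category priority (alternative, same cost).


-- ===== PORT A =====
-- keys = set().union(*[s.keys() for s in samples])
def aKeys (samples : List (List (String × String))) : PySem.Set String :=
  samples.foldl (fun acc s => PySem.Set.union acc (s.map Prod.fst)) PySem.Set.empty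

def detect_study_type (samples : List (List (String × String))) : String :=
  if PySem.Set.contains (aKeys samples) "shuffled_SI_SDR" ||
      PySem.Set.contains (aKeys samples) "shuffled_mean" then
    "temporal_shuffle"
  else if (["mouth_mask_SI_SDR", "nose_mask_SI_SDR", "mouth_mean", "nose_mean"] : List String).any
      (fun k => PySem.Set.contains (aKeys samples) k) then
    "region_masking"
  else if (aKeys samples).any (fun k => PySem.Str.startswith k "SI_SDR_per_p" || k == "proportions") then
    "landmark_dropout"
  else
    "unknown"

-- ===== PORT B =====
def studyPrio (k : String) : Nat :=
  if k == "shuffled_SI_SDR" || k == "shuffled_mean" then 0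
  else if k == "mouth_mask_SI_SDR" || k == "nose_mask_SI_SDR" || k == "mouth_mean" || k == "nose_mean" then 1
  else if PySem.Str.startswith k "SI_SDR_per_p" || k == "proportions" then 2
  else 3

-- the running minimum over the two nested loops of Source B
def bBest (samples : List (List (String × String))) : Nat :=
  samples.foldl (fun b s => s.foldl (fun b kv => if studyPrio kv.1 < b then studyPrio kv.1 else b) b) 3

def detect_study_type_alt (samples : List (List (String × String))) : String :=
  if bBest samples = 0 then "temporal_shuffle"
  else if bBest samples = 1 then "region_masking"
  else if bBest samples = 2 then "landmark_dropout"
  else "unknown"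

-- ===== PRECONDITION & SPEC =====
def Spec_detect_study_type (samples : List (List (String × String))) (out : String) : Prop := out = detect_study_type_alt samples
instance (samples : List (List (String × String))) (out : String) : Decidable (Spec_detect_study_type samples out) := by unfold Spec_detect_study_type; infer_instance

-- ===== CLAIM (what is proved, stated in full; the proofs are below) =====
def Claim_equal_detect_study_type : Prop := ∀ (samples : List (List (String × String))), Dom_detect_study_type samples → Spec_detect_study_type samples (detect_study_type samples)

-- ===== LEMMAS AND PROOFS =====

-- all keys of all samples, with duplicates
def allKeys (samples : List (List (String × String))) : List String :=
  samples.flatMap (fun s => s.map Prod.fst)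

-- A's key set has exactly the members of allKeys
theorem mem_keysFold (samples : List (List (String × String))) (acc : PySem.Set String) (k : String) :
    k ∈ samples.foldl (fun acc s => PySem.Set.union acc (s.map Prod.fst)) acc ↔
      k ∈ acc ∨ k ∈ allKeys samples := by
  induction samples generalizing acc with
  | nil => simp [allKeys]
  | cons s rest ih =>
    simp only [List.foldl_cons, ih, PySem.Set.mem_union, allKeys, List.flatMap_cons,
      List.mem_append]
    tauto

theorem mem_aKeys (samples : List (List (String × String))) (k : String) :
    k ∈ aKeys samples ↔ k ∈ allKeys samples := by
  unfold aKeys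
  rw [mem_keysFold]
  simp [PySem.Set.empty]

-- B's nested fold equals the flat fold over allKeys
theorem bBest_eq (samples : List (List (String × String))) :
    bBest samples = (allKeys samples).foldl (fun b k => if studyPrio k < b then studyPrio k else b) 3 := by
  unfold bBest
  generalize (3 : Nat) = b
  induction samples generalizing b with
  | nil => simp [allKeys]
  | cons s rest ih =>
    simp only [List.foldl_cons, allKeys, List.flatMap_cons, List.foldl_append, ih]
    congr 1
    rw [← List.foldl_map (f := Prod.fst)
      (g := fun b k => if studyPrio k < b then studyPrio k else b)]

-- the flat fold is a running minimum
theorem minfold_le (l : List String) (b : Nat) :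
    l.foldl (fun b k => if studyPrio k < b then studyPrio k else b) b ≤ b := by
  induction l generalizing b with
  | nil => simp
  | cons x xs ih =>
    simp only [List.foldl_cons]
    split
    · exact le_trans (ih _) (by omega)
    · exact ih _

theorem minfold_le_mem (l : List String) (b : Nat) (k : String) (hk : k ∈ l) :
    l.foldl (fun b k => if studyPrio k < b then studyPrio k else b) b ≤ studyPrio k := by
  induction l generalizing b with
  | nil => simp at hk
  | cons x xs ih =>
    simp only [List.foldl_cons]
    rcases List.mem_cons.mp hk with rfl | h
    · split
      · exact minfold_le _ _
      · exact le_trans (minfold_le _ _) (by omega)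
    · exact ih _ h

theorem minfold_mem (l : List String) (b : Nat) :
    l.foldl (fun b k => if studyPrio k < b then studyPrio k else b) b = b ∨
      ∃ k ∈ l, l.foldl (fun b k => if studyPrio k < b then studyPrio k else b) b = studyPrio k := by
  induction l generalizing b with
  | nil => simp
  | cons x xs ih =>
    simp only [List.foldl_cons]
    split
    · rcases ih (studyPrio x) with h | ⟨k, hk, h⟩
      · exact Or.inr ⟨x, List.mem_cons_self, h⟩
      · exact Or.inr ⟨k, List.mem_cons_of_mem _ hk, h⟩
    · rcases ih b with h | ⟨k, hk, h⟩
      · exact Or.inl h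
      · exact Or.inr ⟨k, List.mem_cons_of_mem _ hk, h⟩

-- priority characterizations of A's branch conditions
theorem prio_zero_iff (k : String) :
    studyPrio k = 0 ↔ k = "shuffled_SI_SDR" ∨ k = "shuffled_mean" := by
  constructor
  · intro h
    unfold studyPrio at h
    split_ifs at h with h1 h2 h3 <;> simp_all
  · rintro (rfl | rfl) <;> decide

theorem prio_one_iff (k : String) :
    studyPrio k = 1 ↔ k ∈ (["mouth_mask_SI_SDR", "nose_mask_SI_SDR", "mouth_mean", "nose_mean"] : List String) := by
  constructor
  · intro h
    unfold studyPrio at h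
    split_ifs at h with h1 h2 h3 <;> simp_all <;> tauto
  · intro h
    simp only [List.mem_cons, List.not_mem_nil, or_false] at h
    rcases h with rfl | rfl | rfl | rfl <;> decide

theorem prio_two_of (k : String)
    (h0 : studyPrio k ≠ 0) (h1 : studyPrio k ≠ 1)
    (h : PySem.Str.startswith k "SI_SDR_per_p" || k == "proportions") :
    studyPrio k = 2 := by
  unfold studyPrio at *
  split_ifs at * <;> simp_all

theorem prio_two_cond (k : String) (h : studyPrio k = 2) :
    (PySem.Str.startswith k "SI_SDR_per_p" || k == "proportions") = true := by
  unfold studyPrio at h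
  split_ifs at h <;> simp_all

-- ===== VERDICT (by name: the statement is the Claim_ definition above) =====
theorem detect_study_type_spec : Claim_equal_detect_study_type := by
  intro samples _
  unfold Spec_detect_study_type detect_study_type detect_study_type_alt
  have hle : ∀ k ∈ allKeys samples, bBest samples ≤ studyPrio k := by
    intro k hk
    rw [bBest_eq]
    exact minfold_le_mem _ 3 k hk
  have hmem : bBest samples = 3 ∨ ∃ k ∈ allKeys samples, bBest samples = studyPrio k := by
    rw [bBest_eq]; exact minfold_mem _ 3
  -- condition 1 of A ↔ best = 0
  have c0 : ((PySem.Set.contains (aKeys samples) "shuffled_SI_SDR" ||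
      PySem.Set.contains (aKeys samples) "shuffled_mean") = true) ↔ bBest samples = 0 := by
    constructor
    · intro h
      have hk : ("shuffled_SI_SDR" ∈ allKeys samples) ∨ ("shuffled_mean" ∈ allKeys samples) := by
        rcases Bool.or_eq_true_iff.mp h with h | h
        · exact Or.inl ((mem_aKeys _ _).mp ((PySem.Set.contains_iff _ _).mp h))
        · exact Or.inr ((mem_aKeys _ _).mp ((PySem.Set.contains_iff _ _).mp h))
      rcases hk with hk | hk <;> have := hle _ hk <;>
        simp only [show studyPrio "shuffled_SI_SDR" = 0 from by decide,
          show studyPrio "shuffled_mean" = 0 from by decide] at this <;> omega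
    · intro h
      rcases hmem with h3 | ⟨k, hk, heq⟩
      · omega
      · rw [h] at heq
        rcases (prio_zero_iff k).mp heq.symm with rfl | rfl
        · exact Bool.or_eq_true_iff.mpr (Or.inl ((PySem.Set.contains_iff _ _).mpr ((mem_aKeys _ _).mpr hk)))
        · exact Bool.or_eq_true_iff.mpr (Or.inr ((PySem.Set.contains_iff _ _).mpr ((mem_aKeys _ _).mpr hk)))
  -- condition 2 of A ↔ some key has priority 1
  have c1 : ((["mouth_mask_SI_SDR", "nose_mask_SI_SDR", "mouth_mean", "nose_mean"] : List String).any
      (fun k => PySem.Set.contains (aKeys samples) k) = true) ↔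
      ∃ k ∈ allKeys samples, studyPrio k = 1 := by
    rw [List.any_eq_true]
    constructor
    · rintro ⟨k, hk, hc⟩
      exact ⟨k, (mem_aKeys _ _).mp ((PySem.Set.contains_iff _ _).mp hc), (prio_one_iff k).mpr hk⟩
    · rintro ⟨k, hk, hp⟩
      exact ⟨k, (prio_one_iff k).mp hp, (PySem.Set.contains_iff _ _).mpr ((mem_aKeys _ _).mpr hk)⟩
  by_cases h0 : bBest samples = 0
  · rw [if_pos (c0.mpr h0), if_pos h0]
  · rw [if_neg (fun hc => h0 (c0.mp hc)), if_neg h0]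
    have noP0 : ∀ k ∈ allKeys samples, studyPrio k ≠ 0 := by
      intro k hk heq
      have := hle _ hk
      rw [heq] at this
      exact h0 (by omega)
    by_cases h1 : bBest samples = 1
    · rw [if_pos, if_pos h1]
      rcases hmem with h3 | ⟨k, hk, heq⟩
      · omega
      · exact c1.mpr ⟨k, hk, by omega⟩
    · have noP1 : ∀ k ∈ allKeys samples, studyPrio k ≠ 1 := by
        intro k hk heq
        have := hle _ hk
        rw [heq] at this
        have : bBest samples = 0 ∨ bBest samples = 1 := by omega
        tauto
      rw [if_neg (fun hc => by rcases c1.mp hc with ⟨k, hk, hp⟩; exact noP1 k hk hp), if_neg h1]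
      -- condition 3 of A (given no key of priority 0 or 1) ↔ best = 2
      have c2 : ((aKeys samples).any
          (fun k => PySem.Str.startswith k "SI_SDR_per_p" || k == "proportions") = true) ↔
          bBest samples = 2 := by
        rw [List.any_eq_true]
        constructor
        · rintro ⟨k, hk, hc⟩
          have hk' := (mem_aKeys _ _).mp hk
          have hp2 := prio_two_of k (noP0 k hk') (noP1 k hk') hc
          have := hle _ hk'
          rw [hp2] at this
          omega
        · intro h2
          rcases hmem with h3 | ⟨k, hk, heq⟩
          · omega
          · rw [h2] at heq
            exact ⟨k, (mem_aKeys _ _).mpr hk, prio_two_cond k heq.symm⟩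
      by_cases h2 : bBest samples = 2
      · rw [if_pos (c2.mpr h2), if_pos h2]
      · rw [if_neg (fun hc => h2 (c2.mp hc)), if_neg h2]
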